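-- pv_equiv track=rewrite | github.com/progremming/baekjoon | 프로그래머스/0/120956. 옹알이 （1）/옹알이 （1）.py | solution
-- ===== SOURCE A (Python) =====
-- def solution(babbling):
--     a = ["aya", "ye", "woo", "ma"]
--     count = 0
--
--     for i in babbling:
--         while True:
--             for x in a:
--                 if i[:len(x)] == x:
--                     i = i[len(x):]
--                     break
--             else:
--                 break
--
--         if i == "":
--             count += 1
--
--     return count
-- ===== SOURCE B (Python) =====
-- def solution(babbling):
--     def ok(w):
--         if w == "":
--             return True
--         return any(w.startswith(t) and ok(w[len(t):]) for t in ("aya", "ye", "woo", "ma"))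
--     return sum(1 for w in babbling if ok(w))
-- ===== Notes on version B (the rewrite author's own statement) =====
-- stated objective: simpler
-- what changed: Replaced the imperative while/for-else greedy stripping loop with a recursive-descent acceptance test (ok) over the four tokens plus a counting comprehension; since the tokens start with distinct letters, greedy stripping and the recursive match coincide.
import Mathlib
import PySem

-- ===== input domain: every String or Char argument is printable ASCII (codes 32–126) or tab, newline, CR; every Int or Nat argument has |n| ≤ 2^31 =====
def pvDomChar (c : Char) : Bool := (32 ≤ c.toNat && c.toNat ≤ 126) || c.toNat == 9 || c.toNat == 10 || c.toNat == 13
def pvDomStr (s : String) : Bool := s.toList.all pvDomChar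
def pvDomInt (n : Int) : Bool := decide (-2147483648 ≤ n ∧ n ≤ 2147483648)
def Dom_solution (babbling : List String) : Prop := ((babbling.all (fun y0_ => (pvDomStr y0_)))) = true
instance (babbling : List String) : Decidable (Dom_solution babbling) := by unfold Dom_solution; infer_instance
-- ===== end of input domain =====

-- B replaces A's imperative while/for-else greedy stripping with a recursive-descent
-- acceptance test plus a counting comprehension (objective: simpler).


-- ===== PORT A =====
-- A's inner `while True: for x in a: if i[:len(x)] == x: i = i[len(x):]; break else: break`:
-- the tokens are checked in order; `i[:len(x)] == x` is `take`, `i[len(x):]` is `drop`.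
def stripA (w : List Char) : List Char :=
  if h1 : w.take 3 = ['a','y','a'] then stripA (w.drop 3)
  else if h2 : w.take 2 = ['y','e'] then stripA (w.drop 2)
  else if h3 : w.take 3 = ['w','o','o'] then stripA (w.drop 3)
  else if h4 : w.take 2 = ['m','a'] then stripA (w.drop 2)
  else w
termination_by w.length
decreasing_by
  · have := congrArg List.length h1; simp [List.length_take] at this; simp; omega
  · have := congrArg List.length h2; simp [List.length_take] at this; simp; omega
  · have := congrArg List.length h3; simp [List.length_take] at this; simp; omega
  · have := congrArg List.length h4; simp [List.length_take] at this; simp; omega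

def solution (babbling : List String) : Int :=
  babbling.foldl (fun count i => if stripA i.toList = [] then count + 1 else count) 0

-- ===== PORT B =====
-- Source B's `ok`: empty word accepted, else any token that is a prefix whose remainder is accepted.
def okB (w : List Char) : Bool :=
  if w = [] then true
  else
    (['a','y','a'].isPrefixOf w && okB (w.drop 3)) ||
    (['y','e'].isPrefixOf w && okB (w.drop 2)) ||
    (['w','o','o'].isPrefixOf w && okB (w.drop 3)) ||
    (['m','a'].isPrefixOf w && okB (w.drop 2))
termination_by w.length
decreasing_by
  all_goals cases w <;> simp_all

-- Source B's `sum(1 for w in babbling if ok(w))`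
def solution_alt (babbling : List String) : Int :=
  (babbling.countP (fun w => okB w.toList) : Int)

-- ===== PRECONDITION & SPEC =====
def Spec_solution (babbling : List String) (out : Int) : Prop := out = solution_alt babbling
instance (babbling : List String) (out : Int) : Decidable (Spec_solution babbling out) := by unfold Spec_solution; infer_instance

-- ===== CLAIM (what is proved, stated in full; the proofs are below) =====
def Claim_equal_solution : Prop := ∀ (babbling : List String), Dom_solution babbling → Spec_solution babbling (solution babbling)

-- ===== LEMMAS AND PROOFS =====

theorem take_eq_isPrefixOf (w p : List Char) (h : w.take p.length = p) : p.isPrefixOf w := by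
  rw [List.isPrefixOf_iff_prefix]
  exact h ▸ List.take_prefix _ _

theorem isPrefixOf_take (w p : List Char) (h : p.isPrefixOf w = true) : w.take p.length = p := by
  rw [List.isPrefixOf_iff_prefix] at h
  exact (List.prefix_iff_eq_take.mp h).symm

-- tokens start with distinct letters: a prefix match determines the first character
theorem strip_iff_ok (w : List Char) : (stripA w = [] ↔ okB w = true) := by
  induction w using stripA.induct with
  | case1 w h1 ih =>
    rw [stripA, dif_pos h1, okB, if_neg (by rintro rfl; simp at h1)]
    have hp : (['a','y','a'] : List Char).isPrefixOf w = true := take_eq_isPrefixOf w _ h1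
    constructor
    · intro hs; simp [hp, ih.mp hs]
    · intro ho
      apply ih.mpr
      -- other tokens cannot be prefixes: w starts with 'a'
      obtain ⟨t, rfl⟩ : ∃ t, w = 'a'::'y'::'a'::t := by
        cases w with
        | nil => simp at h1
        | cons c cs => cases cs with
          | nil => simp at h1
          | cons d ds => cases ds with
            | nil => simp at h1
            | cons e es =>
              simp [List.take] at h1
              exact ⟨es, by simp [h1.1, h1.2.1, h1.2.2]⟩
      simpa [List.isPrefixOf] using ho
  | case2 w h1 h2 ih =>
    rw [stripA, dif_neg h1, dif_pos h2, okB, if_neg (by rintro rfl; simp at h2)]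
    have hp : (['y','e'] : List Char).isPrefixOf w = true := take_eq_isPrefixOf w _ h2
    have hnp1 : (['a','y','a'] : List Char).isPrefixOf w = false := by
      by_contra hc
      exact h1 (by simpa using isPrefixOf_take w ['a','y','a'] (by simpa using hc))
    constructor
    · intro hs; simp [hp, ih.mp hs, hnp1]
    · intro ho
      apply ih.mpr
      obtain ⟨t, rfl⟩ : ∃ t, w = 'y'::'e'::t := by
        cases w with
        | nil => simp at h2
        | cons c cs => cases cs with
          | nil => simp at h2
          | cons d ds =>
            simp [List.take] at h2
            exact ⟨ds, by simp [h2.1, h2.2]⟩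
      simpa [List.isPrefixOf] using ho
  | case3 w h1 h2 h3 ih =>
    rw [stripA, dif_neg h1, dif_neg h2, dif_pos h3, okB, if_neg (by rintro rfl; simp at h3)]
    have hp : (['w','o','o'] : List Char).isPrefixOf w = true := take_eq_isPrefixOf w _ h3
    constructor
    · intro hs; simp [hp, ih.mp hs]
    · intro ho
      apply ih.mpr
      obtain ⟨t, rfl⟩ : ∃ t, w = 'w'::'o'::'o'::t := by
        cases w with
        | nil => simp at h3
        | cons c cs => cases cs with
          | nil => simp at h3
          | cons d ds => cases ds with
            | nil => simp at h3
            | cons e es =>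
              simp [List.take] at h3
              exact ⟨es, by simp [h3.1, h3.2.1, h3.2.2]⟩
      simpa [List.isPrefixOf] using ho
  | case4 w h1 h2 h3 h4 ih =>
    rw [stripA, dif_neg h1, dif_neg h2, dif_neg h3, dif_pos h4, okB, if_neg (by rintro rfl; simp at h4)]
    have hp : (['m','a'] : List Char).isPrefixOf w = true := take_eq_isPrefixOf w _ h4
    constructor
    · intro hs; simp [hp, ih.mp hs]
    · intro ho
      apply ih.mpr
      obtain ⟨t, rfl⟩ : ∃ t, w = 'm'::'a'::t := by
        cases w with
        | nil => simp at h4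
        | cons c cs => cases cs with
          | nil => simp at h4
          | cons d ds =>
            simp [List.take] at h4
            exact ⟨ds, by simp [h4.1, h4.2]⟩
      simpa [List.isPrefixOf] using ho
  | case5 w h1 h2 h3 h4 =>
    rw [stripA, dif_neg h1, dif_neg h2, dif_neg h3, dif_neg h4]
    cases hw : decide (w = []) with
    | true => simp_all [okB]
    | false =>
      have hw' : w ≠ [] := by simpa using hw
      rw [okB, if_neg hw']
      have n1 : (['a','y','a'] : List Char).isPrefixOf w = false := by
        by_contra hc; exact h1 (by simpa using isPrefixOf_take w ['a','y','a'] (by simpa using hc))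
      have n2 : (['y','e'] : List Char).isPrefixOf w = false := by
        by_contra hc; exact h2 (by simpa using isPrefixOf_take w ['y','e'] (by simpa using hc))
      have n3 : (['w','o','o'] : List Char).isPrefixOf w = false := by
        by_contra hc; exact h3 (by simpa using isPrefixOf_take w ['w','o','o'] (by simpa using hc))
      have n4 : (['m','a'] : List Char).isPrefixOf w = false := by
        by_contra hc; exact h4 (by simpa using isPrefixOf_take w ['m','a'] (by simpa using hc))
      simp [n1, n2, n3, n4, hw']

theorem foldl_count (l : List String) (acc : Int) :
    l.foldl (fun count i => if stripA i.toList = [] then count + 1 else count) acc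
      = acc + (l.countP (fun w => okB w.toList) : Int) := by
  induction l generalizing acc with
  | nil => simp
  | cons x xs ih =>
    simp only [List.foldl_cons, List.countP_cons, ih]
    by_cases h : stripA x.toList = []
    · have := (strip_iff_ok x.toList).mp h
      simp [h, this]; ring
    · have : okB x.toList = false := by
        cases hh : okB x.toList with
        | false => rfl
        | true => exact absurd ((strip_iff_ok x.toList).mpr hh) h
      simp [h, this]

-- ===== VERDICT (by name: the statement is the Claim_ definition above) =====
theorem solution_spec : Claim_equal_solution := by
  intro babbling _
  unfold Spec_solution solution solution_alt
  rw [foldl_count]; simp
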